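-- pv_equiv track=rewrite | github.com/Mycelium-Project/Mycelium-Project | Enoki/src-tauri/test.py | unfix_hex
-- ===== SOURCE A (Python) =====
-- def unfix_hex(hex_str: str):
--     new_str = ""
--     for char in hex_str:
--         orded = ord(char)
--         if 97 <= orded <= 102:
--             new_str += chr(orded - 39)
--         else:
--             new_str += char
--     return new_str
-- ===== SOURCE B (Python) =====
-- def unfix_hex(hex_str: str):
--     for src, dst in zip('abcdef', ':;<=>?'):
--         hex_str = hex_str.replace(src, dst)
--     return hex_str
-- ===== Notes on version B (the rewrite author's own statement) =====
-- stated objective: alternative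
-- what changed: Replaces A's single per-character loop with a range test and string concatenation by six staged whole-string passes, one str.replace per source letter; correct because the six replacement targets are disjoint from the six source letters, so later passes never touch earlier replacements.
import Mathlib
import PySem

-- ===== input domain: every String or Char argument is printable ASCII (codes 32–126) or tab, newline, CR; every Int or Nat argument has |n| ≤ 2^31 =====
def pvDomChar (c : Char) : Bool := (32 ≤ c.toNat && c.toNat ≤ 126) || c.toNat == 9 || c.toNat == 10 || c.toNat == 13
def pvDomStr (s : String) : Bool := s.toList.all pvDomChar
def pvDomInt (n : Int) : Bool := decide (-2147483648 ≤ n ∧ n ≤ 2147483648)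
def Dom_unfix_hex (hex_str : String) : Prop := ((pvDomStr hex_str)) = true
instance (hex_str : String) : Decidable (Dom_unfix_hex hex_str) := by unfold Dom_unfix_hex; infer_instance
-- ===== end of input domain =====

-- B replaces A's per-character loop (range test + string concatenation) by six staged
-- whole-string str.replace passes, one per source letter; return values proved equal.


-- ===== PORT A =====
-- loop over the characters, appending the shifted char when 97 ≤ ord(char) ≤ 102, else the char
def unfix_hex (hex_str : String) : String :=
  hex_str.toList.foldl
    (fun new_str c =>
      if 97 ≤ c.toNat ∧ c.toNat ≤ 102 then
        new_str.push (Char.ofNat (c.toNat - 39))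
      else
        new_str.push c) ""

-- ===== PORT B =====
-- for src, dst in zip('abcdef', ':;<=>?'): hex_str = hex_str.replace(src, dst)
def unfix_hex_alt (hex_str : String) : String :=
  (List.zip "abcdef".toList ":;<=>?".toList).foldl
    (fun s p => PySem.Str.replace s (String.ofList [p.1]) (String.ofList [p.2])) hex_str

-- ===== PRECONDITION & SPEC =====
def Spec_unfix_hex (hex_str : String) (out : String) : Prop := out = unfix_hex_alt hex_str
instance (hex_str : String) (out : String) : Decidable (Spec_unfix_hex hex_str out) := by unfold Spec_unfix_hex; infer_instance

-- ===== CLAIM (what is proved, stated in full; the proofs are below) =====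
def Claim_equal_unfix_hex : Prop := ∀ (hex_str : String), Dom_unfix_hex hex_str → Spec_unfix_hex hex_str (unfix_hex hex_str)

-- ===== LEMMAS AND PROOFS =====

-- single-character replace.go is a map over the remaining characters
theorem replace_go_single (a b : Char) :
    ∀ (fuel : Nat) (l acc : List Char), l.length ≤ fuel →
      PySem.Chars.replace.go [a] [b] fuel l acc
        = acc.reverse ++ l.map (fun c => if c = a then b else c) := by
  intro fuel
  induction fuel with
  | zero =>
    intro l acc h
    have : l = [] := List.length_eq_zero_iff.mp (Nat.le_zero.mp h)
    subst this; simp [PySem.Chars.replace.go]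
  | succ n ih =>
    intro l acc h
    cases l with
    | nil => simp [PySem.Chars.replace.go]
    | cons c t =>
      by_cases hc : c = a
      · subst hc
        have hpre : List.isPrefixOf [c] (c :: t) = true := by
          simp [List.isPrefixOf]
        rw [PySem.Chars.replace.go]
        simp only [hpre, if_pos]
        have := ih t ([b] ++ acc) (by simpa using Nat.le_of_succ_le_succ h)
        simpa using this
      · have hpre : List.isPrefixOf [a] (c :: t) = false := by
          simp [List.isPrefixOf]
          exact fun h' => (hc h'.symm).elim
        rw [PySem.Chars.replace.go]
        simp only [hpre]
        have := ih t (c :: acc) (by simpa using Nat.le_of_succ_le_succ h)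
        simpa [hc] using this

-- single-character replace is a map
theorem replace_single (a b : Char) (s : List Char) :
    PySem.Chars.replace s [a] [b] = s.map (fun c => if c = a then b else c) := by
  rw [PySem.Chars.replace]
  simp only [List.isEmpty_cons, Bool.false_eq_true, if_false]
  exact replace_go_single a b s.length s [] le_rfl

-- A's push-accumulating fold is the accumulator followed by the map over the rest
theorem unfix_foldl (g : Char → Char) (l : List Char) (s : String) :
    l.foldl (fun acc c => acc.push (g c)) s = s ++ String.ofList (l.map g) := by
  induction l generalizing s with
  | nil => apply String.toList_inj.mp; simp
  | cons a t ih =>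
    simp only [List.foldl, List.map, ih]
    apply String.toList_inj.mp
    simp

-- the six single-char substitutions composed agree with A's range test and shift
theorem char_eq_of_toNat (c d : Char) (h : c.toNat = d.toNat) : c = d :=
  Char.ext (UInt32.toNat_inj.mp h)

theorem six_subst_eq (c : Char) :
    (fun x => if x = 'f' then '?' else x)
      ((fun x => if x = 'e' then '>' else x)
        ((fun x => if x = 'd' then '=' else x)
          ((fun x => if x = 'c' then '<' else x)
            ((fun x => if x = 'b' then ';' else x)
              ((fun x => if x = 'a' then ':' else x) c)))))
      = if 97 ≤ c.toNat ∧ c.toNat ≤ 102 then Char.ofNat (c.toNat - 39) else c := by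
  by_cases h : 97 ≤ c.toNat ∧ c.toNat ≤ 102
  · have h6 : c.toNat = 97 ∨ c.toNat = 98 ∨ c.toNat = 99 ∨ c.toNat = 100 ∨
        c.toNat = 101 ∨ c.toNat = 102 := by omega
    have hv : c = 'a' ∨ c = 'b' ∨ c = 'c' ∨ c = 'd' ∨ c = 'e' ∨ c = 'f' := by
      rcases h6 with h1 | h1 | h1 | h1 | h1 | h1
      · exact Or.inl (char_eq_of_toNat c 'a' (h1.trans (by decide)))
      · exact Or.inr (Or.inl (char_eq_of_toNat c 'b' (h1.trans (by decide))))
      · exact Or.inr (Or.inr (Or.inl (char_eq_of_toNat c 'c' (h1.trans (by decide)))))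
      · exact Or.inr (Or.inr (Or.inr (Or.inl (char_eq_of_toNat c 'd' (h1.trans (by decide))))))
      · exact Or.inr (Or.inr (Or.inr (Or.inr (Or.inl (char_eq_of_toNat c 'e' (h1.trans (by decide)))))))
      · exact Or.inr (Or.inr (Or.inr (Or.inr (Or.inr (char_eq_of_toNat c 'f' (h1.trans (by decide)))))))
    rcases hv with h1 | h1 | h1 | h1 | h1 | h1 <;> subst h1 <;> decide
  · have ha : c ≠ 'a' := fun e => h (by subst e; decide)
    have hb : c ≠ 'b' := fun e => h (by subst e; decide)
    have hc : c ≠ 'c' := fun e => h (by subst e; decide)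
    have hd : c ≠ 'd' := fun e => h (by subst e; decide)
    have he : c ≠ 'e' := fun e => h (by subst e; decide)
    have hf : c ≠ 'f' := fun e => h (by subst e; decide)
    simp [ha, hb, hc, hd, he, hf, h]

-- ===== VERDICT (by name: the statement is the Claim_ definition above) =====
theorem unfix_hex_spec : Claim_equal_unfix_hex := by
  intro hex_str _
  unfold Spec_unfix_hex unfix_hex unfix_hex_alt
  have hfun : (fun (new_str : String) (c : Char) =>
      if 97 ≤ c.toNat ∧ c.toNat ≤ 102 then
        new_str.push (Char.ofNat (c.toNat - 39))
      else
        new_str.push c)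
    = fun (acc : String) (c : Char) =>
        acc.push (if 97 ≤ c.toNat ∧ c.toNat ≤ 102 then Char.ofNat (c.toNat - 39) else c) := by
    funext acc c; split_ifs <;> rfl
  rw [hfun, unfix_foldl]
  have hz : List.zip "abcdef".toList ":;<=>?".toList
      = [('a',':'),('b',';'),('c','<'),('d','='),('e','>'),('f','?')] := by decide
  rw [hz]
  simp only [List.foldl]
  apply String.toList_inj.mp
  simp only [String.toList_append, String.toList_empty, List.nil_append,
    String.toList_ofList, PySem.Str.toList_replace]
  simp only [replace_single, List.map_map]
  apply List.map_congr_left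
  intro c _
  simpa [Function.comp] using (six_subst_eq c).symm
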